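-- pv_equiv track=rewrite | github.com/tblacerda/skynet | SkynetRev1_5.py | get_setor_number
-- ===== SOURCE A (Python) =====
-- def get_setor_number(cell_name):
--     """Return the sector number: 1 for A/I, 2 for B/J, 3 for C/K."""
--
--     def is_setor_A(cell_name):
--         """Check if the cell name ends with sector A or sector I."""
--         return any(cell_name.endswith(ending) for ending in ["A", "I"])
--
--     def is_setor_B(cell_name):
--         """Check if the cell name ends with sector B or sector J."""
--         return any(cell_name.endswith(ending) for ending in ["B", "J"])
--
--     def is_setor_C(cell_name):
--         """Check if the cell name ends with sector C or sector K."""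
--         return any(cell_name.endswith(ending) for ending in ["C", "K"])
--
--     if is_setor_A(cell_name):
--         return 1
--     elif is_setor_B(cell_name):
--         return 2
--     elif is_setor_C(cell_name):
--         return 3
--     else:
--         return None  # Return None if no sector matches
-- ===== SOURCE B (Python) =====
-- def get_setor_number(cell_name):
--     """Return the sector number: 1 for A/I, 2 for B/J, 3 for C/K."""
--     if not cell_name:
--         return None
--     d = ord(cell_name[-1]) - ord('A')
--     if 0 <= d <= 2:
--         return d + 1
--     if 8 <= d <= 10:
--         return d - 7
--     return None
-- ===== Notes on version B (the rewrite author's own statement) =====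
-- stated objective: alternative
-- what changed: Computes the sector arithmetically from the last character's code point (offset d from uppercase-a: d in 0..2 gives d+1, d in 8..10 gives d-7) instead of testing six string suffixes through three helper predicates and an if/elif chain; no letter table or suffix tests remain.
import Mathlib
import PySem

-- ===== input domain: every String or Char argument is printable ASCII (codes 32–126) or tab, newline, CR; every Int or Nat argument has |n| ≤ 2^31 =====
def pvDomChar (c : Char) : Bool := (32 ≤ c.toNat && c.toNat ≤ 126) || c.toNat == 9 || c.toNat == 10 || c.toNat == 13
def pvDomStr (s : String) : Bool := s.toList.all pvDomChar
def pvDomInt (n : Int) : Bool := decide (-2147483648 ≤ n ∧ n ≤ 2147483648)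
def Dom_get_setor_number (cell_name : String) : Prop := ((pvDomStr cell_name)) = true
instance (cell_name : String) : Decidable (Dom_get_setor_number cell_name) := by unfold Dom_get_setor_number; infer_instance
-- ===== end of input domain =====

-- B computes the sector arithmetically from the last character's code point (ord(c)-ord('A'))
-- instead of A's three endswith-helper predicates and if/elif chain (alternative decomposition).

-- ===== PORT A =====
def is_setor_A (cell_name : String) : Bool :=
  ["A", "I"].any (fun ending => PySem.Str.endswith cell_name ending)

def is_setor_B (cell_name : String) : Bool :=
  ["B", "J"].any (fun ending => PySem.Str.endswith cell_name ending)

def is_setor_C (cell_name : String) : Bool :=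
  ["C", "K"].any (fun ending => PySem.Str.endswith cell_name ending)

def get_setor_number (cell_name : String) : Option Int :=
  if is_setor_A cell_name then some 1
  else if is_setor_B cell_name then some 2
  else if is_setor_C cell_name then some 3
  else none

-- ===== PORT B =====
-- 'if not cell_name' → emptiness test on the code points; ord(c) → (c.toNat : Int) (exact on the ASCII domain and beyond: both are the code point)
def get_setor_number_alt (cell_name : String) : Option Int :=
  if cell_name.toList = [] then none
  else
    match PySem.Str.pyGet? cell_name (-1) with
    | none => none  -- unreachable: the string is nonempty
    | some c =>
      let d : Int := (c.toNat : Int) - 65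
      if 0 ≤ d ∧ d ≤ 2 then some (d + 1)
      else if 8 ≤ d ∧ d ≤ 10 then some (d - 7)
      else none

-- ===== PRECONDITION & SPEC =====
def Spec_get_setor_number (cell_name : String) (out : Option Int) : Prop := out = get_setor_number_alt cell_name
instance (cell_name : String) (out : Option Int) : Decidable (Spec_get_setor_number cell_name out) := by unfold Spec_get_setor_number; infer_instance

-- ===== CLAIM (what is proved, stated in full; the proofs are below) =====
def Claim_equal_get_setor_number : Prop := ∀ (cell_name : String), Dom_get_setor_number cell_name → Spec_get_setor_number cell_name (get_setor_number cell_name)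

-- ===== LEMMAS AND PROOFS =====

theorem suffix_singleton_iff (a c : Char) (l : List Char) : ([a] <:+ l ++ [c]) ↔ c = a := by
  constructor
  · rintro ⟨t, ht⟩
    have := congrArg (·.getLast?) ht
    simpa [eq_comm] using this
  · rintro rfl; exact ⟨l, rfl⟩

theorem endswith_concat_single (l : List Char) (c a : Char) :
    PySem.Chars.endswith (l ++ [c]) [a] = (c == a) := by
  cases h : (c == a) with
  | true =>
      have hc : c = a := by simpa using h
      subst hc
      exact (PySem.Chars.endswith_iff _ _).mpr ⟨l, rfl⟩
  | false =>
      rw [← Bool.not_eq_true, PySem.Chars.endswith_iff, suffix_singleton_iff]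
      intro hc; simp [hc] at h

theorem str_endswith_last (s : String) (l : List Char) (c : Char) (h : s.toList = l ++ [c])
    (a : Char) (t : String) (ht : t.toList = [a]) :
    PySem.Str.endswith s t = (c == a) := by
  rw [PySem.Str.endswith_eq, h, ht, endswith_concat_single]

theorem char_eq_iff_toNat (c a : Char) : (c == a) = decide (c.toNat = a.toNat) := by
  rcases eq_or_ne c a with rfl | h
  · simp
  · have hn : c.toNat ≠ a.toNat := fun hn => h (Char.ext (UInt32.toNat_inj.mp hn))
    simp [h, hn]

-- ===== VERDICT (by name: the statement is the Claim_ definition above) =====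
theorem get_setor_number_spec : Claim_equal_get_setor_number := by
  intro s _
  unfold Spec_get_setor_number get_setor_number get_setor_number_alt is_setor_A is_setor_B is_setor_C
  rcases List.eq_nil_or_concat s.toList with h | ⟨l, c, h⟩
  · have hs : s = "" := String.ext (by simpa using h)
    subst hs; decide
  · rw [List.concat_eq_append] at h
    have hget : PySem.Str.pyGet? s (-1) = some c := by
      simp [PySem.Str.pyGet?, h, PySem.List.pyGet?_neg_one_append_singleton]
    have hne : ¬ s.toList = [] := by simp [h]
    rw [if_neg hne, hget]
    simp only [List.any_cons, List.any_nil,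
      str_endswith_last s l c h 'A' "A" (by decide), str_endswith_last s l c h 'I' "I" (by decide),
      str_endswith_last s l c h 'B' "B" (by decide), str_endswith_last s l c h 'J' "J" (by decide),
      str_endswith_last s l c h 'C' "C" (by decide), str_endswith_last s l c h 'K' "K" (by decide),
      Bool.or_false, char_eq_iff_toNat]
    have hA : ('A' : Char).toNat = 65 := by decide
    have hB : ('B' : Char).toNat = 66 := by decide
    have hC : ('C' : Char).toNat = 67 := by decide
    have hI : ('I' : Char).toNat = 73 := by decide
    have hJ : ('J' : Char).toNat = 74 := by decide
    have hK : ('K' : Char).toNat = 75 := by decide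
    rw [hA, hB, hC, hI, hJ, hK]
    simp only [Bool.or_eq_true, decide_eq_true_eq]
    split_ifs <;>
      first
        | rfl
        | (exfalso; omega)
        | (simp only [Option.some.injEq]; omega)
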